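-- pv_equiv track=rewrite | github.com/bramstoeller/adventofcode | aoc2025/grid.py | _make_wrapped_source
-- ===== SOURCE A (Python) =====
-- def _make_wrapped_source(grid, kw, kh):
--     source = []
--     height, width = len(grid), len(grid[0])
--     kw_half, kh_half = kw // 2, kh // 2
--     for dy in range(-kh_half, height + kh_half):
--         src_row = grid[dy % height]
--         row = []
--         for dx in range(-kw_half, width + kw_half):
--             row.append(src_row[dx % width])
--         source.append(row)
--     return source
-- ===== SOURCE B (Python) =====
-- def _make_wrapped_source(grid, kw, kh):
--     height, width = len(grid), len(grid[0])
--     kw_half, kh_half = kw // 2, kh // 2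
--
--     def tile(seq, n, half):
--         # the wrapped window seq[d % n] for d in range(-half, n + half) is a
--         # contiguous slice of enough concatenated copies of seq
--         start = (-half) % n
--         stop = start + n + 2 * half
--         reps = -(-stop // n)  # ceil division
--         return (seq * reps)[start:stop]
--
--     rows = [tile(row[:width], width, kw_half) for row in grid]
--     return tile(rows, height, kh_half)
-- ===== Notes on version B (the rewrite author's own statement) =====
-- stated objective: alternative
-- what changed: B builds each wrapped row (and the wrapped block of rows) as one contiguous slice of enough concatenated copies of the sequence (tiling + slicing), instead of A's nested per-cell loops computing an index modulo for every output cell.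
-- outside the precondition, e.g. on _make_wrapped_source([[]], 0, 3): A returns [[], [], []], B raises ZeroDivisionError; on _make_wrapped_source([[]], 2, -2): A returns [], B raises ZeroDivisionError
import Mathlib
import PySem

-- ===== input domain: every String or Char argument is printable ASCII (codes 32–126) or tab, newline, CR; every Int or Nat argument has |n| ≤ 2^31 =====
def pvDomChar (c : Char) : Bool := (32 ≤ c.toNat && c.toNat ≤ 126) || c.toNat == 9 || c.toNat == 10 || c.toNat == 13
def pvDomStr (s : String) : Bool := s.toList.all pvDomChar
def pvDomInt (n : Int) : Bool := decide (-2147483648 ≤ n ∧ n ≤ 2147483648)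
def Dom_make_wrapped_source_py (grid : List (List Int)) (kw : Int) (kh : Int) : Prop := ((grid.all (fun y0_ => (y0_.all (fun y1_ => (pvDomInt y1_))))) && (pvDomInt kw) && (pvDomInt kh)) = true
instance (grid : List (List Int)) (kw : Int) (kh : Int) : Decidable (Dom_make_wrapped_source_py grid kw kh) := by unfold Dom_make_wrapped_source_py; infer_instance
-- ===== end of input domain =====

-- B materialises each wrapped row (and the wrapped block of rows) as a single slice of
-- concatenated copies of the sequence, replacing A's per-cell modulo loops (objective:
-- alternative).


-- ===== PORT A =====
def make_wrapped_source_py (grid : List (List Int)) (kw : Int) (kh : Int) : List (List Int) :=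
  let height : Int := grid.length
  let width : Int := (PySem.List.pyGetD grid 0 ([] : List Int)).length
  let kw_half : Int := PySem.Int.floordiv kw 2
  let kh_half : Int := PySem.Int.floordiv kh 2
  (PySem.List.pyRange (-kh_half) (height + kh_half) 1).foldl (fun source dy =>
    let src_row := PySem.List.pyGetD grid (PySem.Int.mod dy height) ([] : List Int)
    let row := (PySem.List.pyRange (-kw_half) (width + kw_half) 1).foldl (fun row dx =>
      row ++ [PySem.List.pyGetD src_row (PySem.Int.mod dx width) 0]) ([] : List Int)
    source ++ [row]) []

-- ===== PORT B =====
-- Source B's helper 'tile(seq, n, half)': slice of enough concatenated copies of seq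
def pvTile {α : Type} (seq : List α) (n : Int) (half : Int) : List α :=
  let start := PySem.Int.mod (-half) n
  let stop := start + n + 2 * half
  let reps := -(PySem.Int.floordiv (-stop) n)   -- ceil division -(-stop // n)
  PySem.List.slice (PySem.List.pyRepeat seq reps) (some start) (some stop)

def make_wrapped_source_py_alt (grid : List (List Int)) (kw : Int) (kh : Int) : List (List Int) :=
  let height : Int := grid.length
  let width : Int := (PySem.List.pyGetD grid 0 ([] : List Int)).length
  let kw_half : Int := PySem.Int.floordiv kw 2
  let kh_half : Int := PySem.Int.floordiv kh 2
  let rows := grid.map (fun row =>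
    pvTile (PySem.List.slice row none (some width)) width kw_half)
  pvTile rows height kh_half

-- ===== PRECONDITION & SPEC =====
-- Pre_ excludes inputs where A raises (empty grid: IndexError; a row shorter than row 0:
-- IndexError; zero-width row 0 with a nonempty inner range: ZeroDivisionError) and the
-- remaining zero-width-row-0 inputs, on which A returns rows of [] (or []) while B's
-- tiling helper still takes an index modulo the zero width and raises ZeroDivisionError.
def Pre_make_wrapped_source_py (grid : List (List Int)) (kw : Int) (kh : Int) : Prop :=
  grid ≠ [] ∧ 0 < grid.headI.length ∧
    ((∀ row ∈ grid, grid.headI.length ≤ row.length) ∨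
      (grid.length : Int) + 2 * PySem.Int.floordiv kh 2 ≤ 0 ∨
      (grid.headI.length : Int) + 2 * PySem.Int.floordiv kw 2 ≤ 0)
instance (grid : List (List Int)) (kw : Int) (kh : Int) : Decidable (Pre_make_wrapped_source_py grid kw kh) := by unfold Pre_make_wrapped_source_py; infer_instance
def pvWitness_make_wrapped_source_py : List (List Int) × Int × Int := ([[1, 2], [3, 4]], 3, 3)
def Spec_make_wrapped_source_py (grid : List (List Int)) (kw : Int) (kh : Int) (out : List (List Int)) : Prop := out = make_wrapped_source_py_alt grid kw kh
instance (grid : List (List Int)) (kw : Int) (kh : Int) (out : List (List Int)) : Decidable (Spec_make_wrapped_source_py grid kw kh out) := by unfold Spec_make_wrapped_source_py; infer_instance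

-- ===== CLAIM (what is proved, stated in full; the proofs are below) =====
def Claim_equal_make_wrapped_source_py : Prop := ∀ (grid : List (List Int)) (kw : Int) (kh : Int), Dom_make_wrapped_source_py grid kw kh → Pre_make_wrapped_source_py grid kw kh → Spec_make_wrapped_source_py grid kw kh (make_wrapped_source_py grid kw kh)

-- ===== LEMMAS AND PROOFS =====

-- element j of seq * m is seq[j % len(seq)]
lemma pv_getElem?_flatten_replicate {α : Type} (seq : List α) (m j : Nat)
    (hj : j < m * seq.length) :
    ((List.replicate m seq).flatten)[j]? = seq[j % seq.length]? := by
  induction m generalizing j with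
  | zero => omega
  | succ m ih =>
    rw [List.replicate_succ, List.flatten_cons]
    by_cases hsmall : j < seq.length
    · rw [List.getElem?_append_left hsmall, Nat.mod_eq_of_lt hsmall]
    · have hle : seq.length ≤ j := le_of_not_gt hsmall
      have hexp : (m + 1) * seq.length = m * seq.length + seq.length := by ring
      rw [List.getElem?_append_right hle, ih (j - seq.length) (by omega),
        ← Nat.mod_eq_sub_mod hle]

-- an empty window: tile returns [] whatever the sequence is
lemma pv_tile_empty {α : Type} (seq : List α) (n half : Int) (hn : 0 < n)
    (hcase : n + 2 * half ≤ 0) : pvTile seq n half = [] := by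
  unfold pvTile
  show PySem.List.slice
      (PySem.List.pyRepeat seq
        (-(PySem.Int.floordiv (-(PySem.Int.mod (-half) n + n + 2 * half)) n)))
      (some (PySem.Int.mod (-half) n))
      (some (PySem.Int.mod (-half) n + n + 2 * half)) = _
  set start : Int := PySem.Int.mod (-half) n with hstart_def
  have hstart0 : 0 ≤ start := PySem.Int.mod_nonneg _ hn
  have hstartn : start < n := PySem.Int.mod_lt _ hn
  set stop : Int := start + n + 2 * half with hstop_def
  set reps : Int := -(PySem.Int.floordiv (-stop) n) with hreps_def
  have hceil : (reps - 1) * n < stop ∧ stop ≤ reps * n :=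
    (PySem.Int.neg_floordiv_neg_eq_iff_of_pos hn).mp rfl
  have hreplenNat : (PySem.List.pyRepeat seq reps).length = reps.toNat * seq.length := by
    simp [PySem.List.pyRepeat, List.length_flatten, List.map_replicate, List.sum_replicate]
  apply List.length_eq_zero_iff.mp
  rw [PySem.List.length_slice]
  by_cases hsn : stop < 0
  · have hr0 : reps ≤ 0 := by
      by_contra hx
      have h0 : 0 ≤ (reps - 1) * n := mul_nonneg (by omega) (by omega)
      omega
    have hrt : reps.toNat = 0 := by omega
    have hrl : (PySem.List.pyRepeat seq reps).length = 0 := by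
      rw [hreplenNat, hrt]
      simp
    simp only [PySem.List.clampIdx, hrl]
    split_ifs <;> omega
  · have hstople : stop ≤ start := by omega
    simp only [PySem.List.clampIdx]
    split_ifs <;> omega

-- Source B's tile on a sequence of length n computes exactly A's wrapped-window map
lemma pv_tile_eq {α : Type} (d0 : α) (seq : List α) (half : Int) (hne : seq ≠ []) :
    pvTile seq (seq.length : Int) half
      = (PySem.List.pyRange (-half) ((seq.length : Int) + half) 1).map
          (fun d => PySem.List.pyGetD seq (PySem.Int.mod d (seq.length : Int)) d0) := by
  have hn : 0 < (seq.length : Int) := by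
    exact_mod_cast List.length_pos_iff.mpr hne
  unfold pvTile
  show PySem.List.slice
      (PySem.List.pyRepeat seq
        (-(PySem.Int.floordiv
            (-(PySem.Int.mod (-half) (seq.length : Int) + (seq.length : Int) + 2 * half))
            (seq.length : Int))))
      (some (PySem.Int.mod (-half) (seq.length : Int)))
      (some (PySem.Int.mod (-half) (seq.length : Int) + (seq.length : Int) + 2 * half)) = _
  set n : Int := (seq.length : Int) with hn_def
  set start : Int := PySem.Int.mod (-half) n with hstart_def
  have hstart0 : 0 ≤ start := PySem.Int.mod_nonneg _ hn
  have hstartn : start < n := PySem.Int.mod_lt _ hn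
  set stop : Int := start + n + 2 * half with hstop_def
  set reps : Int := -(PySem.Int.floordiv (-stop) n) with hreps_def
  have hceil : (reps - 1) * n < stop ∧ stop ≤ reps * n :=
    (PySem.Int.neg_floordiv_neg_eq_iff_of_pos hn).mp rfl
  have hreplen : ((PySem.List.pyRepeat seq reps).length : Int) = reps.toNat * n := by
    simp only [PySem.List.pyRepeat, List.length_flatten, List.map_replicate,
      List.sum_replicate, smul_eq_mul]
    push_cast
    ring
  have hreplenNat : (PySem.List.pyRepeat seq reps).length = reps.toNat * seq.length := by
    simp [PySem.List.pyRepeat, List.length_flatten, List.map_replicate, List.sum_replicate]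
  by_cases hcase : n + 2 * half ≤ 0
  · -- empty window: both sides are []
    rw [PySem.List.pyRange_one_eq_nil (by omega)]
    simp only [List.map_nil]
    apply List.length_eq_zero_iff.mp
    rw [PySem.List.length_slice]
    by_cases hr1 : 1 ≤ reps
    · have h0 : 0 ≤ (reps - 1) * n := mul_nonneg (by omega) (by omega)
      have hreq : reps = 1 := by
        by_contra hx
        have h2 : (1 : Int) ≤ reps - 1 := by omega
        have h3 := mul_le_mul_of_nonneg_right h2 (le_of_lt hn)
        rw [one_mul] at h3
        omega
      have hrl : (PySem.List.pyRepeat seq reps).length = seq.length := by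
        rw [hreplenNat, hreq]
        simp
      simp only [PySem.List.clampIdx, hrl]
      split_ifs <;> omega
    · have hrt : reps.toNat = 0 := by omega
      have hrl : (PySem.List.pyRepeat seq reps).length = 0 := by
        rw [hreplenNat, hrt]
        simp
      simp only [PySem.List.clampIdx, hrl]
      split_ifs <;> omega
  · have hwin : 0 < n + 2 * half := by omega
    have hstoppos : 0 < stop := by omega
    have hrepspos : 0 < reps := by
      by_contra hc
      have : reps * n ≤ 0 := mul_nonpos_of_nonpos_of_nonneg (by omega) (by omega)
      omega
    have hstople : stop ≤ reps * n := hceil.2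
    have hrn : ((reps.toNat * seq.length : Nat) : Int) = reps * n := by
      push_cast
      rw [Int.toNat_of_nonneg (le_of_lt hrepspos), ← hn_def]
    rw [PySem.List.slice_toNat _ hstart0 (le_of_lt hstoppos)]
    apply List.ext_getElem
    · simp only [List.length_take, List.length_drop, List.length_map,
        PySem.List.length_pyRange_one, hreplenNat]
      omega
    · intro i h1 h2
      simp only [List.length_take, List.length_drop, hreplenNat] at h1
      rw [List.getElem_take, List.getElem_drop]
      have hblt : start.toNat + i < reps.toNat * seq.length := by omega
      have hmodlt : (start.toNat + i) % seq.length < seq.length := by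
        refine Nat.mod_lt _ ?_
        omega
      have hleft : (PySem.List.pyRepeat seq reps)[start.toNat + i]'(by omega)
          = seq[(start.toNat + i) % seq.length] := by
        apply Option.some.inj
        rw [← List.getElem?_eq_getElem, ← List.getElem?_eq_getElem]
        simp only [PySem.List.pyRepeat]
        exact pv_getElem?_flatten_replicate seq reps.toNat (start.toNat + i) hblt
      rw [hleft]
      simp only [List.length_map, PySem.List.length_pyRange_one] at h2
      rw [List.getElem_map, PySem.List.getElem_pyRange_one]
      have hmodeq : PySem.Int.mod (-half + (i : Int)) n = (-half + (i : Int)) % n :=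
        PySem.Int.mod_eq_emod_of_pos hn
      have hstartemod : start = (-half) % n := PySem.Int.mod_eq_emod_of_pos hn
      have he0 : 0 ≤ (-half + (i : Int)) % n := Int.emod_nonneg _ (by omega)
      have he1 : (-half + (i : Int)) % n < n := Int.emod_lt_of_pos _ hn
      rw [hmodeq, PySem.List.pyGetD_eq_getElem seq d0 he0 (by exact_mod_cast he1)]
      have hint : (((start.toNat + i) % seq.length : Nat) : Int) = (-half + (i : Int)) % n := by
        push_cast [Int.toNat_of_nonneg hstart0]
        rw [← hn_def, hstartemod, Int.emod_add_emod]
      have hidx : (start.toNat + i) % seq.length = ((-half + (i : Int)) % n).toNat := by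
        omega
      simp only [hidx]

-- ===== VERDICT (by name: the statement is the Claim_ definition above) =====
theorem make_wrapped_source_py_spec : Claim_equal_make_wrapped_source_py := by
  intro grid kw kh _ hpre
  obtain ⟨hne, hw0, hcase3⟩ := hpre
  have hh : (0 : Int) < grid.length := by exact_mod_cast List.length_pos_iff.mpr hne
  have hwpos : (0 : Int) < (grid.headI.length : Int) := by exact_mod_cast hw0
  have hhead : PySem.List.pyGetD grid 0 ([] : List Int) = grid.headI := by
    rw [PySem.List.pyGetD_zero]
    cases grid with
    | nil => simp at hne
    | cons a t => rfl
  unfold Spec_make_wrapped_source_py make_wrapped_source_py make_wrapped_source_py_alt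
  rw [hhead]
  simp only [PySem.List.foldl_append_singleton_eq_map, List.nil_append]
  rcases hcase3 with hwle | houter | hinner
  · -- generic case: every row at least as long as row 0
    -- B's outer tile: the rows list has exactly grid.length elements
    have hrowslen : (grid.map (fun row =>
        pvTile (PySem.List.slice row none (some (grid.headI.length : Int)))
          (grid.headI.length : Int) (PySem.Int.floordiv kw 2))).length = grid.length := by
      simp
    have hrowsne : grid.map (fun row =>
        pvTile (PySem.List.slice row none (some (grid.headI.length : Int)))
          (grid.headI.length : Int) (PySem.Int.floordiv kw 2)) ≠ [] := by
      simp [hne]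
    rw [show ((grid.length : Int)) = ((grid.map (fun row =>
        pvTile (PySem.List.slice row none (some (grid.headI.length : Int)))
          (grid.headI.length : Int) (PySem.Int.floordiv kw 2))).length : Int) by rw [hrowslen],
      pv_tile_eq ([] : List Int) _ (PySem.Int.floordiv kh 2) hrowsne]
    rw [hrowslen]
    refine List.map_congr_left (fun dy _ => ?_)
    have h0 : 0 ≤ PySem.Int.mod dy grid.length := PySem.Int.mod_nonneg dy hh
    have h1 : PySem.Int.mod dy grid.length < grid.length := PySem.Int.mod_lt dy hh
    have key : ∀ (f : List Int → List Int),
        PySem.List.pyGetD (grid.map f) (PySem.Int.mod dy grid.length) ([] : List Int)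
          = f (PySem.List.pyGetD grid (PySem.Int.mod dy grid.length) ([] : List Int)) := by
      intro f
      rw [PySem.List.pyGetD_eq_getElem (grid.map f) ([] : List Int) h0 (by simpa using h1),
        List.getElem_map, PySem.List.pyGetD_eq_getElem grid ([] : List Int) h0 h1]
    rw [key]
    set src := PySem.List.pyGetD grid (PySem.Int.mod dy grid.length) ([] : List Int) with hsrc_def
    have hsrcmem : src ∈ grid := by
      rw [hsrc_def, PySem.List.pyGetD_eq_getElem grid ([] : List Int) h0 h1]
      exact List.getElem_mem _
    have hsrclen : grid.headI.length ≤ src.length := hwle src hsrcmem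
    have htr : PySem.List.slice src none (some (grid.headI.length : Int))
        = src.take grid.headI.length := by
      rw [PySem.List.slice_to src (by positivity)]
      simp
    have htrlen : (src.take grid.headI.length).length = grid.headI.length := by
      simp [hsrclen]
    have htrne : src.take grid.headI.length ≠ [] := by
      rw [← List.length_pos_iff, htrlen]; omega
    rw [htr, show ((grid.headI.length : Int)) = ((src.take grid.headI.length).length : Int) by
        rw [htrlen],
      pv_tile_eq (0 : Int) _ (PySem.Int.floordiv kw 2) htrne]
    rw [htrlen]
    refine List.map_congr_left (fun dx _ => ?_)
    have g0 : 0 ≤ PySem.Int.mod dx (grid.headI.length : Int) :=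
      PySem.Int.mod_nonneg dx hwpos
    have g1 : PySem.Int.mod dx (grid.headI.length : Int) < grid.headI.length :=
      PySem.Int.mod_lt dx hwpos
    rw [PySem.List.pyGetD_eq_getElem (src.take grid.headI.length) (0 : Int) g0
        (by rw [htrlen]; exact_mod_cast g1),
      PySem.List.pyGetD_eq_getElem src (0 : Int) g0 (by
        have hc : ((grid.headI.length : Int)) ≤ (src.length : Int) := by exact_mod_cast hsrclen
        omega)]
    rw [List.getElem_take]

  · -- empty outer window: both sides are []
    rw [PySem.List.pyRange_one_eq_nil
        (a := -PySem.Int.floordiv kh 2) (b := (grid.length : Int) + PySem.Int.floordiv kh 2)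
        (by omega),
      List.map_nil, pv_tile_empty _ _ _ hh (by omega)]
  · -- empty inner window: every output row is []
    have hrowslen : (grid.map (fun row =>
        pvTile (PySem.List.slice row none (some (grid.headI.length : Int)))
          (grid.headI.length : Int) (PySem.Int.floordiv kw 2))).length = grid.length := by
      simp
    have hrowsne : grid.map (fun row =>
        pvTile (PySem.List.slice row none (some (grid.headI.length : Int)))
          (grid.headI.length : Int) (PySem.Int.floordiv kw 2)) ≠ [] := by
      simp [hne]
    rw [show ((grid.length : Int)) = ((grid.map (fun row =>
        pvTile (PySem.List.slice row none (some (grid.headI.length : Int)))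
          (grid.headI.length : Int) (PySem.Int.floordiv kw 2))).length : Int) by rw [hrowslen],
      pv_tile_eq ([] : List Int) _ (PySem.Int.floordiv kh 2) hrowsne]
    rw [hrowslen]
    refine List.map_congr_left (fun dy _ => ?_)
    have h0 : 0 ≤ PySem.Int.mod dy grid.length := PySem.Int.mod_nonneg dy hh
    have h1 : PySem.Int.mod dy grid.length < grid.length := PySem.Int.mod_lt dy hh
    rw [PySem.List.pyGetD_eq_getElem (grid.map _) ([] : List Int) h0 (by simpa using h1),
      List.getElem_map, pv_tile_empty _ _ _ hwpos (by omega),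
      PySem.List.pyRange_one_eq_nil (by omega), List.map_nil]
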